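-- pv_equiv track=rewrite | github.com/tonruscan/PiUI | core/app.py | _match_audio_device
-- ===== SOURCE A (Python) =====
-- def _match_audio_device(needle, haystack):
--     if not needle:
--         return None
--     target = str(needle).lower()
--     for device in haystack:
--         if device and str(device).lower() == target:
--             return device
--     for device in haystack:
--         if device and target in str(device).lower():
--             return device
--     return None
-- ===== SOURCE B (Python) =====
-- def _match_audio_device(needle, haystack):
--     if not needle:
--         return None
--     target = str(needle).lower()
--     fallback = None
--     for device in haystack:
--         if not device:
--             continue
--         low = str(device).lower()
--         if low == target:
--             return device
--         if fallback is None and target in low: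
--             fallback = device
--     return fallback
-- ===== Notes on version B (the rewrite author's own statement) =====
-- stated objective: simpler
-- what changed: Replaced A's two full passes (exact-match scan, then substring scan) by one pass that returns on exact match and keeps the first substring match in a fallback variable.
import Mathlib
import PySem

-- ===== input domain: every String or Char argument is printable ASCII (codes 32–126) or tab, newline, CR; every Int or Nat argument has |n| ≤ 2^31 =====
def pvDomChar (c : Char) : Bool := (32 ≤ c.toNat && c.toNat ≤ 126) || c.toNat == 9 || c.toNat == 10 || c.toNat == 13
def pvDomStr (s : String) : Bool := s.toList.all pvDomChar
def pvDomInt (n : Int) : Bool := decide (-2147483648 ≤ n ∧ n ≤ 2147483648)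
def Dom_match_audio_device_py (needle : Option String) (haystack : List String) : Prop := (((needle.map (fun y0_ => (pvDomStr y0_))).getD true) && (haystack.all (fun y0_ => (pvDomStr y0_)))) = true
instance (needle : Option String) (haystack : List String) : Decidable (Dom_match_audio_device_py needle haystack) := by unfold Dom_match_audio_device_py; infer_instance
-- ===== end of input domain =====

-- ===== PORT A =====
-- A (two passes: exact scan, then substring scan), transliterated loop by loop.
def pvLoopExact (target : String) : List String → Option String
  | [] => none
  | d :: rest =>
    if d ≠ "" ∧ PySem.Str.lower d = target then some d else pvLoopExact target rest

def pvLoopSub (target : String) : List String → Option String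
  | [] => none
  | d :: rest =>
    if d ≠ "" ∧ PySem.Str.isIn target (PySem.Str.lower d) = true then some d
    else pvLoopSub target rest

def match_audio_device_py (needle : Option String) (haystack : List String) : Option String :=
  match needle with
  | none => none
  | some s =>
    if s = "" then none
    else
      let target := PySem.Str.lower s
      match pvLoopExact target haystack with
      | some d => some d
      | none => pvLoopSub target haystack

-- ===== PORT B =====
-- B: one pass, returning on exact match, first substring match kept in a fallback.
def pvLoopB (target : String) (fallback : Option String) : List String → Option String
  | [] => fallback
  | d :: rest =>
    if d = "" then pvLoopB target fallback rest
    else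
      let low := PySem.Str.lower d
      if low = target then some d
      else
        pvLoopB target
          (if fallback = none ∧ PySem.Str.isIn target low = true then some d else fallback)
          rest

def match_audio_device_py_alt (needle : Option String) (haystack : List String) : Option String :=
  match needle with
  | none => none
  | some s =>
    if s = "" then none
    else pvLoopB (PySem.Str.lower s) none haystack

-- ===== PRECONDITION & SPEC =====
def Spec_match_audio_device_py (needle : Option String) (haystack : List String) (out : Option String) : Prop := out = match_audio_device_py_alt needle haystack
instance (needle : Option String) (haystack : List String) (out : Option String) : Decidable (Spec_match_audio_device_py needle haystack out) := by unfold Spec_match_audio_device_py; infer_instance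

-- ===== CLAIM (what is proved, stated in full; the proofs are below) =====
def Claim_equal_match_audio_device_py : Prop := ∀ (needle : Option String) (haystack : List String), Dom_match_audio_device_py needle haystack → Spec_match_audio_device_py needle haystack (match_audio_device_py needle haystack)

-- ===== LEMMAS AND PROOFS =====
-- The one-pass loop equals "exact pass, else the fallback, else the substring pass".
theorem pvLoopB_eq (target : String) (fb : Option String) (xs : List String) :
    pvLoopB target fb xs =
      match pvLoopExact target xs with
      | some d => some d
      | none =>
        match fb with
        | some f => some f
        | none => pvLoopSub target xs := by
  induction xs generalizing fb with
  | nil => cases fb <;> simp [pvLoopB, pvLoopExact, pvLoopSub]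
  | cons d rest ih =>
    by_cases hd : d = ""
    · simp [pvLoopB, pvLoopExact, pvLoopSub, hd, ih]
    · by_cases he : PySem.Str.lower d = target
      · simp [pvLoopB, pvLoopExact, hd, he]
      · cases fb with
        | some f => simp [pvLoopB, pvLoopExact, hd, he, ih]
        | none =>
          simp [pvLoopB, pvLoopExact, pvLoopSub, hd, he, ih]
          cases pvLoopExact target rest with
          | some e => rfl
          | none =>
            by_cases h : PySem.Chars.isIn target.toList (PySem.Chars.lower d.toList) = true <;>
              simp [h]

-- ===== VERDICT (by name: the statement is the Claim_ definition above) =====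
theorem match_audio_device_py_spec : Claim_equal_match_audio_device_py := by
  intro needle haystack _
  unfold Spec_match_audio_device_py match_audio_device_py match_audio_device_py_alt
  cases needle with
  | none => rfl
  | some s =>
    by_cases hs : s = ""
    · simp [hs]
    · simp only [hs, if_false, pvLoopB_eq]
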